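-- pv_equiv track=rewrite | github.com/DongKey777/woowa-learning-hub | scripts/learning/rag/eval/ablation.py | normalize_modality_set
-- ===== SOURCE A (Python) =====
-- from collections.abc import Sequence
--
-- CANONICAL_MODALITIES = ("fts", "dense", "sparse", "colbert")
--
-- def normalize_modality_set(value: Sequence[str]) -> tuple[str, ...]:
--     """Validate and canonicalise one modality subset."""
--     if not value:
--         raise ValueError("modality set must be non-empty")
--     unknown = [m for m in value if m not in CANONICAL_MODALITIES]
--     if unknown:
--         raise ValueError(f"unknown modalities: {unknown!r}")
--     seen: set[str] = set()
--     ordered: list[str] = []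
--     for modality in CANONICAL_MODALITIES:
--         if modality in value and modality not in seen:
--             ordered.append(modality)
--             seen.add(modality)
--     return tuple(ordered)
-- ===== SOURCE B (Python) =====
-- CANONICAL_MODALITIES = ("fts", "dense", "sparse", "colbert")
--
-- def normalize_modality_set(value):
--     """Validate and canonicalise one modality subset."""
--     if not value:
--         raise ValueError("modality set must be non-empty")
--     unknown = [m for m in value if m not in CANONICAL_MODALITIES]
--     if unknown:
--         raise ValueError(f"unknown modalities: {unknown!r}")
--     order = {m: i for i, m in enumerate(CANONICAL_MODALITIES)}
--     present = dict.fromkeys(value)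
--     return tuple(sorted(present, key=order.__getitem__))
-- ===== Notes on version B (the rewrite author's own statement) =====
-- stated objective: idiomatic
-- what changed: Instead of scanning the canonical tuple and testing membership in the input for each modality, B builds a canonical-position index map, dedups the input with dict.fromkeys, and sorts the present modalities by their canonical index.
import Mathlib
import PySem

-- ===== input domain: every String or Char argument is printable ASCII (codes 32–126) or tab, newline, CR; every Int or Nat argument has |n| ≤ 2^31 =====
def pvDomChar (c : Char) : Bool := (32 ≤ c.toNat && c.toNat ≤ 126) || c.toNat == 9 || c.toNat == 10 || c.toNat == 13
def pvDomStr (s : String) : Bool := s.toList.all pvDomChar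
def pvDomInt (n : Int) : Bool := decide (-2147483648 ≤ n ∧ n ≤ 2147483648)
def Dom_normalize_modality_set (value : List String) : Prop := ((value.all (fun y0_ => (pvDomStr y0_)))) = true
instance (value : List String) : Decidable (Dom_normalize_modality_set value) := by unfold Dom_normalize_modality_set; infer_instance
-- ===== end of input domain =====

-- B is an idiomatic re-implementation: index map + dedup + sort by canonical position,
-- instead of A's scan over the canonical tuple with membership tests. Return value only
-- (both raise identically on empty/unknown input; those inputs are outside Pre_).

def pvCanonical : List String := ["fts", "dense", "sparse", "colbert"]

-- ===== PORT A =====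
-- A's loop: for modality in CANONICAL_MODALITIES: if modality in value and modality not in seen: append + add
def normalize_modality_set (value : List String) : List String :=
  (pvCanonical.foldl
    (fun (st : PySem.Set String × List String) modality =>
      if modality ∈ value ∧ modality ∉ st.1 then (st.1.add modality, st.2 ++ [modality]) else st)
    (PySem.Set.ofList [], [])).2

-- ===== PORT B =====
-- order = {m: i for i, m in enumerate(CANONICAL_MODALITIES)}; present = dict.fromkeys(value);
-- tuple(sorted(present, key=order.__getitem__)).  order[m] cannot miss inside Pre_ (all
-- modalities validated as canonical), so the lookup is ported as getD with default 0.
def pvOrder : PySem.Dict String Int :=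
  (PySem.List.enumerate pvCanonical).foldl (fun (d : PySem.Dict String Int) im => d.insert im.2 (im.1 : Int)) PySem.Dict.empty

def normalize_modality_set_alt (value : List String) : List String :=
  let present := PySem.List.dedup value
  PySem.List.sorted present (fun m => pvOrder.getD m 0) false

-- ===== PRECONDITION & SPEC =====
-- A raises ValueError on an empty list and on any modality outside the canonical four; exactly those inputs are excluded.
def Pre_normalize_modality_set (value : List String) : Prop :=
  value ≠ [] ∧ ∀ m ∈ value, m ∈ pvCanonical
instance (value : List String) : Decidable (Pre_normalize_modality_set value) := by
  unfold Pre_normalize_modality_set; infer_instance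

def pvWitness_normalize_modality_set : List String := ["colbert", "fts", "fts"]

def Spec_normalize_modality_set (value : List String) (out : List String) : Prop := out = normalize_modality_set_alt value
instance (value : List String) (out : List String) : Decidable (Spec_normalize_modality_set value out) := by unfold Spec_normalize_modality_set; infer_instance

-- ===== CLAIM (what is proved, stated in full; the proofs are below) =====
def Claim_equal_normalize_modality_set : Prop := ∀ (value : List String), Dom_normalize_modality_set value → Pre_normalize_modality_set value → Spec_normalize_modality_set value (normalize_modality_set value)

-- ===== LEMMAS AND PROOFS =====

-- A's scan over the canonical literal is the canonical list filtered by membership in value.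
lemma portA_eq_filter (value : List String) :
    normalize_modality_set value = pvCanonical.filter (fun m => decide (m ∈ value)) := by
  by_cases h1 : "fts" ∈ value <;> by_cases h2 : "dense" ∈ value <;>
    by_cases h3 : "sparse" ∈ value <;> by_cases h4 : "colbert" ∈ value <;>
  simp [normalize_modality_set, pvCanonical, List.foldl, h1, h2, h3, h4,
        PySem.Set.ofList, List.filter]

lemma canonical_pairwise_lt :
    pvCanonical.Pairwise (fun a b => pvOrder.getD a 0 < pvOrder.getD b 0) := by
  decide

theorem normalize_modality_set_spec_aux (value : List String)
    (hpre : ∀ m ∈ value, m ∈ pvCanonical) :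
    normalize_modality_set value = normalize_modality_set_alt value := by
  rw [portA_eq_filter]
  unfold normalize_modality_set_alt
  have hperm : (pvCanonical.filter (fun m => decide (m ∈ value))).Perm (PySem.List.dedup value) := by
    rw [List.perm_ext_iff_of_nodup
      (List.Nodup.filter _ (by decide : pvCanonical.Nodup)) (PySem.List.nodup_dedup value)]
    intro a
    simp only [List.mem_filter, PySem.List.mem_dedup, decide_eq_true_eq]
    exact ⟨fun h => h.2, fun h => ⟨hpre a h, h⟩⟩
  have hpair := List.Pairwise.filter (fun m => decide (m ∈ value)) canonical_pairwise_lt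
  exact (PySem.List.sorted_eq_of_perm_of_pairwise_lt _ _ _ hperm hpair).symm

-- ===== VERDICT (by name: the statement is the Claim_ definition above) =====
theorem normalize_modality_set_spec : Claim_equal_normalize_modality_set := by
  intro value _ hpre
  exact normalize_modality_set_spec_aux value hpre.2
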